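-- pv_equiv track=rewrite | github.com/python-discord/game-jam-2020 | charlie-experiments/grid_functions.py | compress_up
-- ===== SOURCE A (Python) =====
-- from typing import List
--
-- def compress_up(grid: List) -> bool:
--     changed = False
--     for col_no in range(len(grid[0])):
--         row_no = 0
--         for _ in range(len(grid)):
--             if grid[row_no][col_no] != 0:
--                 # No zero, look further
--                 row_no += 1
--             else:
--                 # Found a zero, shift cells
--                 r = row_no
--                 while r < len(grid) - 1:
--                     grid[r][col_no] = grid[r + 1][col_no]
--                     if grid[r][col_no]:
--                         changed = True
--                     r += 1
--                 grid[-1][col_no] = 0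
--     return changed
-- ===== SOURCE B (Python) =====
-- from typing import List
--
--
-- def _compact(rows: int, col: List) -> List:
--     vals = [v for v in col if v != 0]
--     return vals + [0] * (rows - len(vals))
--
--
-- def compress_up(grid: List) -> bool:
--     # One pass per column: read each column once, compact it, compare, write back.
--     rows = len(grid)
--     cols = [[row[c] for row in grid] for c in range(len(grid[0]))]
--     new_cols = [_compact(rows, col) for col in cols]
--     changed = any(nc != oc for nc, oc in zip(new_cols, cols))
--     for r, row in enumerate(grid):
--         for c, nc in enumerate(new_cols):
--             row[c] = nc[r]
--     return changed
-- ===== Notes on version B (the rewrite author's own statement) =====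
-- stated objective: alternative
-- what changed: Instead of A's repeated one-cell shift loop for every zero found (re-scanning the column tail each time), B reads each column once, builds its compacted form (nonzeros followed by zeros) directly, compares it with the original to set the changed flag, and writes it back.
import Mathlib
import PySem

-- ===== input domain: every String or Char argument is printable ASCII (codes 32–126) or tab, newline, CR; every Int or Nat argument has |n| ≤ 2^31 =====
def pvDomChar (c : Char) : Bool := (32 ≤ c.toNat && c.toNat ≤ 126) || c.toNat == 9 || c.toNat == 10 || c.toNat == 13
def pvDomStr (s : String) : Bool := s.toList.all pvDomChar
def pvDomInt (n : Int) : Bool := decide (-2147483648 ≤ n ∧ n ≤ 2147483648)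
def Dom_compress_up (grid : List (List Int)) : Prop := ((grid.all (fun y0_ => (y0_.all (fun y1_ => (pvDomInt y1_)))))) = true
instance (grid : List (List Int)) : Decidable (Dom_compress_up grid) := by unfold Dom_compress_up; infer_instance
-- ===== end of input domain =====

-- A mutates `grid` in place (both A and B compact every column upward identically);
-- the equivalence proved here is about the RETURN value only.

-- ===== PORT A =====
-- grid[r][c]; every access A makes is in range on Pre_, so getD's default is never read there
def getCell (g : List (List Int)) (r c : Nat) : Int := (g.getD r []).getD c 0
-- grid[r][c] = v
def setCell (g : List (List Int)) (r c : Nat) (v : Int) : List (List Int) :=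
  g.set r ((g.getD r []).set c v)

theorem length_setCell (g : List (List Int)) (r c : Nat) (v : Int) :
    (setCell g r c v).length = g.length := by simp [setCell]

-- the `while r < len(grid) - 1` shift loop
def shiftLoop (g : List (List Int)) (c r : Nat) (ch : Bool) : List (List Int) × Bool :=
  if r < g.length - 1 then
    let v := getCell g (r + 1) c
    shiftLoop (setCell g r c v) c (r + 1) (if v ≠ 0 then true else ch)
  else (g, ch)
termination_by g.length - 1 - r
decreasing_by simp only [length_setCell]; omega

-- one iteration of `for _ in range(len(grid))`
def innerStep (c : Nat) (st : List (List Int) × Nat × Bool) : List (List Int) × Nat × Bool :=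
  if getCell st.1 st.2.1 c ≠ 0 then (st.1, st.2.1 + 1, st.2.2)
  else
    let p := shiftLoop st.1 c st.2.1 st.2.2
    (setCell p.1 (p.1.length - 1) c 0, st.2.1, p.2)

-- the body of `for col_no in range(len(grid[0]))`
def colPass (g : List (List Int)) (c : Nat) (ch : Bool) : List (List Int) × Bool :=
  let res := (List.range g.length).foldl (fun st _ => innerStep c st) (g, 0, ch)
  (res.1, res.2.2)

def compress_up (grid : List (List Int)) : Bool :=
  ((List.range ((grid.getD 0 []).length)).foldl (fun st c => colPass st.1 c st.2) (grid, false)).2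

-- ===== PORT B =====
-- _compact(rows, col)
def compact (rows : Nat) (col : List Int) : List Int :=
  let vals := col.filter (fun v => v ≠ 0)
  vals ++ List.replicate (rows - vals.length) 0

-- return value of B: the in-place write-back does not affect it
def compress_up_alt (grid : List (List Int)) : Bool :=
  let rows := grid.length
  let cols := (List.range ((grid.getD 0 []).length)).map (fun c => grid.map (fun row => row.getD c 0))
  let newCols := cols.map (compact rows)
  (newCols.zip cols).any (fun p => decide (p.1 ≠ p.2))

-- ===== PRECONDITION & SPEC =====
-- Pre_ excludes exactly the inputs on which A raises (IndexError): the empty grid, and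
-- grids where some row is shorter than the first row (A indexes every row at every column of row 0).
def Pre_compress_up (grid : List (List Int)) : Prop :=
  grid ≠ [] ∧ ∀ row ∈ grid, (grid.headD []).length ≤ row.length
instance (grid : List (List Int)) : Decidable (Pre_compress_up grid) := by
  unfold Pre_compress_up; infer_instance

def pvWitness_compress_up : List (List Int) := [[1, 0], [0, 2]]

def Spec_compress_up (grid : List (List Int)) (out : Bool) : Prop := out = compress_up_alt grid
instance (grid : List (List Int)) (out : Bool) : Decidable (Spec_compress_up grid out) := by
  unfold Spec_compress_up; infer_instance

-- ===== CLAIM (what is proved, stated in full; the proofs are below) =====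
def Claim_equal_compress_up : Prop := ∀ (grid : List (List Int)), Dom_compress_up grid → Pre_compress_up grid → Spec_compress_up grid (compress_up grid)

-- ===== LEMMAS AND PROOFS =====

-- column c of the grid, as a list (defaults never read in range)
def col (g : List (List Int)) (c : Nat) : List Int := g.map (fun row => row.getD c 0)

-- every row has length ≥ k
def RowsOK (g : List (List Int)) (k : Nat) : Prop := ∀ row ∈ g, k ≤ row.length

-- does the column contain a zero strictly above a nonzero? (= A sets `changed` on it)
def hasZN : List Int → Bool
  | [] => false
  | x :: rest => if x = 0 then rest.any (fun v => decide (v ≠ 0)) else hasZN rest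

-- 1-D mirror of shiftLoop on the column
def shiftCol1 (xs : List Int) (r : Nat) (ch : Bool) : List Int × Bool :=
  if r < xs.length - 1 then
    let v := xs.getD (r + 1) 0
    shiftCol1 (xs.set r v) (r + 1) (if v ≠ 0 then true else ch)
  else (xs, ch)
termination_by xs.length - 1 - r
decreasing_by simp only [List.length_set]; omega

-- 1-D mirror of innerStep
def stepA (st : List Int × Nat × Bool) : List Int × Nat × Bool :=
  if st.1.getD st.2.1 0 ≠ 0 then (st.1, st.2.1 + 1, st.2.2)
  else
    let p := shiftCol1 st.1 st.2.1 st.2.2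
    (p.1.set (p.1.length - 1) 0, st.2.1, p.2)

theorem getCell_col (g : List (List Int)) (r c : Nat) :
    getCell g r c = (col g c).getD r 0 := by
  simp only [getCell, col, List.getD_eq_getElem?_getD, List.getElem?_map]
  cases g[r]? <;> simp

theorem col_setCell_self (g : List (List Int)) (r c : Nat) (v : Int) (k : Nat)
    (hk : RowsOK g k) (hc : c < k) :
    col (setCell g r c v) c = (col g c).set r v := by
  apply List.ext_getElem?
  intro j
  simp only [col, setCell, List.getElem?_map, List.getElem?_set]
  by_cases hj : r = j
  · subst hj
    by_cases hr : r < g.length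
    · have hrow : g[r]? = some g[r] := List.getElem?_eq_getElem hr
      have hmem : g[r] ∈ g := List.getElem_mem hr
      have hlen : c < g[r].length := lt_of_lt_of_le hc (hk _ hmem)
      have hgd : g.getD r [] = g[r] := by simp [List.getD_eq_getElem?_getD, hrow]
      simp [hr, hrow, hgd, List.getD_eq_getElem?_getD, List.getElem?_set_self hlen]
    · have : g.length ≤ r := Nat.le_of_not_lt hr
      simp [hr, List.getElem?_eq_none (by simpa using this)]
  · simp [hj]

theorem col_setCell_ne (g : List (List Int)) (r c c' : Nat) (v : Int) (h : c' ≠ c) :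
    col (setCell g r c v) c' = col g c' := by
  apply List.ext_getElem?
  intro j
  simp only [col, setCell, List.getElem?_map, List.getElem?_set]
  by_cases hj : r = j
  · subst hj
    cases hr : g[r]? with
    | none =>
      have hle : g.length ≤ r := by simpa using List.getElem?_eq_none_iff.mp hr
      simp only [hr]
      simp [hle]
    | some row =>
      have hlt : r < g.length := by
        by_contra hcon
        rw [List.getElem?_eq_none (by omega)] at hr; simp at hr
      have hgr : g[r] = row := by
        rw [List.getElem?_eq_getElem hlt] at hr; exact Option.some.inj hr
      have hgd : g.getD r [] = row := by simp [List.getD_eq_getElem?_getD, hr]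
      simp [hlt, hr, hgr, hgd, List.getD_eq_getElem?_getD,
        List.getElem?_set_ne (fun hcc => h hcc.symm)]
  · simp [hj]

theorem rowsOK_setCell (g : List (List Int)) (r c : Nat) (v : Int) (k : Nat)
    (hk : RowsOK g k) : RowsOK (setCell g r c v) k := by
  by_cases hr : r < g.length
  · intro row hrow
    rcases List.mem_or_eq_of_mem_set hrow with h | h
    · exact hk _ h
    · subst h
      simp only [List.length_set]
      have hrow : g[r]? = some g[r] := List.getElem?_eq_getElem hr
      have : g.getD r [] = g[r] := by simp [List.getD_eq_getElem?_getD, hrow]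
      rw [this]; exact hk _ (List.getElem_mem hr)
  · unfold setCell
    rw [List.set_eq_of_length_le (Nat.le_of_not_lt hr)]
    exact hk

-- shiftLoop simulates shiftCol1 on column c, preserving everything else
theorem shiftLoop_sim (k c : Nat) (hc : c < k) :
    ∀ g r ch, RowsOK g k →
      (shiftLoop g c r ch).1.length = g.length ∧
      RowsOK (shiftLoop g c r ch).1 k ∧
      (∀ c', c' ≠ c → col (shiftLoop g c r ch).1 c' = col g c') ∧
      col (shiftLoop g c r ch).1 c = (shiftCol1 (col g c) r ch).1 ∧
      (shiftLoop g c r ch).2 = (shiftCol1 (col g c) r ch).2 := by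
  intro g r ch hk
  induction ht : g.length - 1 - r using Nat.strong_induction_on generalizing g r ch with
  | _ t ih =>
  have hlc : (col g c).length = g.length := by simp [col]
  by_cases h : r < g.length - 1
  · rw [shiftLoop]
    rw [if_pos h]
    rw [shiftCol1]
    rw [if_pos (by rw [hlc]; exact h)]
    have hgv : getCell g (r + 1) c = (col g c).getD (r + 1) 0 := getCell_col g (r + 1) c
    have hset : col (setCell g r c (getCell g (r + 1) c)) c
        = (col g c).set r ((col g c).getD (r + 1) 0) := by
      rw [col_setCell_self g r c _ k hk hc, hgv]
    have hk' : RowsOK (setCell g r c (getCell g (r + 1) c)) k := rowsOK_setCell _ _ _ _ _ hk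
    have hlen' : (setCell g r c (getCell g (r + 1) c)).length = g.length := length_setCell _ _ _ _
    obtain ⟨i1, i2, i3, i4, i5⟩ :=
      ih (g.length - 1 - (r + 1)) (by omega) (setCell g r c (getCell g (r + 1) c)) (r + 1)
        (if getCell g (r + 1) c ≠ 0 then true else ch) hk' (by rw [hlen'])
    refine ⟨by rw [i1, hlen'], i2, ?_, ?_, ?_⟩
    · intro c' hc'
      rw [i3 c' hc', col_setCell_ne g r c c' _ hc']
    · rw [i4, hset, hgv]
    · rw [i5, hset, hgv]
  · rw [shiftLoop]
    rw [if_neg h]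
    rw [shiftCol1]
    rw [if_neg (by rw [hlc]; exact h)]
    exact ⟨rfl, hk, fun _ _ => rfl, rfl, rfl⟩

-- closed form of the 1-D shift loop
theorem shiftCol1_spec (xs : List Int) (r : Nat) (ch : Bool) :
    shiftCol1 xs r ch =
      ((if r < xs.length - 1 then
          xs.take r ++ xs.drop (r + 1) ++ [xs.getD (xs.length - 1) 0] else xs),
        (ch || (xs.drop (r + 1)).any (fun v => decide (v ≠ 0)))) := by
  fun_induction shiftCol1 xs r ch with
  | case1 xs r ch h v ih =>
    simp only [dite_eq_ite] at ih
    rw [ih, if_pos h]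
    have hn : r + 1 < xs.length := by omega
    have hv : v = xs[r + 1] := by
      simp [v, List.getD_eq_getElem?_getD, List.getElem?_eq_getElem hn]
    have hset : xs.set r v = xs.take r ++ v :: xs.drop (r + 1) := by
      rw [List.set_eq_take_append_cons_drop]; simp only [if_pos (by omega : r < xs.length)]
    have hlenr : (xs.take r).length = r := by rw [List.length_take]; omega
    have hlen : (xs.set r v).length = xs.length := by simp
    have htake : (xs.set r v).take (r + 1) = xs.take r ++ [v] := by
      rw [hset, List.take_append, hlenr]
      simp
    have hdrop2 : (xs.set r v).drop (r + 2) = xs.drop (r + 2) := by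
      rw [hset, List.drop_append, hlenr]
      have h1 : r + 2 - r = 2 := by omega
      rw [h1]
      simp [List.drop_drop]
    have hdrop : xs.drop (r + 1) = xs[r + 1] :: xs.drop (r + 2) := by
      rw [List.drop_eq_getElem_cons hn]
    by_cases hb : r + 1 < xs.length - 1
    · have hgetD : (xs.set r v).getD (xs.length - 1) 0 = xs.getD (xs.length - 1) 0 := by
        simp [List.getD_eq_getElem?_getD, List.getElem?_set_ne (by omega : r ≠ xs.length - 1)]
      rw [if_pos (by rw [hlen]; exact hb)]
      simp only [hlen, Prod.mk.injEq]
      constructor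
      · rw [htake, hdrop2, hgetD, hdrop, ← hv]
        simp
      · rw [hdrop2, hdrop, ← hv]
        by_cases hv0 : v = 0 <;> simp [hv0]
    · have hr1 : r + 1 = xs.length - 1 := by omega
      rw [if_neg (by rw [hlen]; exact hb)]
      simp only [Prod.mk.injEq]
      constructor
      · rw [hset, hdrop]
        have hd1 : xs.drop (r + 2) = [] := List.drop_eq_nil_of_le (by omega)
        have hgl : xs.getD (xs.length - 1) 0 = xs[r + 1] := by
          rw [← hr1]
          simp [List.getD_eq_getElem?_getD, List.getElem?_eq_getElem hn]
        rw [hd1, hgl, ← hv]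
        simp
      · have hd2 : (xs.set r v).drop (r + 1 + 1) = [] := by
          apply List.drop_eq_nil_of_le; rw [hlen]; omega
        rw [hd2, hdrop]
        have hd1 : xs.drop (r + 2) = [] := List.drop_eq_nil_of_le (by omega)
        rw [hd1, ← hv]
        by_cases hv0 : v = 0 <;> simp [hv0]
  | case2 xs r ch h =>
    have : xs.drop (r + 1) = [] := List.drop_eq_nil_of_le (by omega)
    simp [this, h]

-- innerStep simulates stepA
theorem innerStep_sim (k c : Nat) (hc : c < k) (g : List (List Int)) (i : Nat) (ch : Bool)
    (hk : RowsOK g k) :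
    (innerStep c (g, i, ch)).1.length = g.length ∧
    RowsOK (innerStep c (g, i, ch)).1 k ∧
    (∀ c', c' ≠ c → col (innerStep c (g, i, ch)).1 c' = col g c') ∧
    col (innerStep c (g, i, ch)).1 c = (stepA (col g c, i, ch)).1 ∧
    (innerStep c (g, i, ch)).2 = (stepA (col g c, i, ch)).2 := by
  have hg : getCell g i c = (col g c).getD i 0 := getCell_col g i c
  have hgd : (col g c).getD i 0 = (col g c)[i]?.getD 0 := List.getD_eq_getElem?_getD
  unfold innerStep stepA
  simp only [hg, hgd, ne_eq, ite_not]
  by_cases h0 : (col g c)[i]?.getD 0 = 0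
  · simp only [if_pos h0]
    obtain ⟨s1, s2, s3, s4, s5⟩ := shiftLoop_sim k c hc g i ch hk
    have hq : (shiftCol1 (col g c) i ch).1.length = (shiftLoop g c i ch).1.length := by
      rw [← s4]; simp [col]
    refine ⟨by rw [length_setCell]; exact s1, rowsOK_setCell _ _ _ _ _ s2, ?_, ?_, by rw [s5]⟩
    · intro c' hc'
      rw [col_setCell_ne _ _ _ _ _ hc']
      exact s3 c' hc'
    · rw [col_setCell_self _ _ _ _ k s2 hc, s4, hq]
  · simp [h0]
    exact hk

-- helpers for the 1-D analysis
theorem hasZN_allzero (zs : List Int) (h : ∀ v ∈ zs, v = 0) : hasZN zs = false := by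
  induction zs with
  | nil => rfl
  | cons x rest ih =>
    have hx : x = 0 := h x (List.mem_cons_self)
    have hr : rest.any (fun v => decide (v ≠ 0)) = false := by
      simp only [List.any_eq_false]
      intro v hv
      simp [h v (List.mem_cons_of_mem _ hv)]
    simp only [hasZN, hx] at *
    simp only [if_true]
    exact hr

theorem hasZN_takeWhile (zs : List Int) (h : hasZN zs = true) :
    (zs.takeWhile (fun v => decide (v ≠ 0))).length < zs.length := by
  induction zs with
  | nil => simp [hasZN] at h
  | cons x rest ih =>
    by_cases hx : x = 0
    · rw [hx]
      simp
    · simp only [hasZN, if_neg hx] at h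
      have hdx : decide (x ≠ 0) = true := by simpa using hx
      rw [List.takeWhile_cons, hdx]
      simp only [if_true, List.length_cons]
      have := ih h
      omega

-- one-step unfoldings of stepA
theorem stepA_nz (xs : List Int) (i : Nat) (ch : Bool) (h : xs.getD i 0 ≠ 0) :
    stepA (xs, i, ch) = (xs, i + 1, ch) := by
  rw [List.getD_eq_getElem?_getD] at h
  simp [stepA, h]

theorem stepA_z_ch (xs : List Int) (i : Nat) (ch : Bool) (h : xs.getD i 0 = 0) :
    (stepA (xs, i, ch)).2 = (i, ch || (xs.drop (i + 1)).any (fun v => decide (v ≠ 0))) := by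
  have h' := h
  rw [List.getD_eq_getElem?_getD] at h'
  simp [stepA, h', shiftCol1_spec]

theorem stepA_z_val (xs : List Int) (i : Nat) (ch : Bool) (h : xs.getD i 0 = 0) (hi : i < xs.length) :
    (stepA (xs, i, ch)).1 = xs.take i ++ xs.drop (i + 1) ++ [0] := by
  simp only [stepA, h, if_neg (by simp : ¬ ((0:Int) ≠ 0)), shiftCol1_spec]
  by_cases hb : i < xs.length - 1
  · rw [if_pos hb]
    have hlen : (xs.take i ++ xs.drop (i + 1) ++ [xs.getD (xs.length - 1) 0]).length = xs.length := by
      simp; omega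
    rw [hlen]
    have : xs.length - 1 = (xs.take i ++ xs.drop (i + 1)).length := by simp; omega
    rw [this, List.set_append_right _ _ (by omega)]
    simp
  · rw [if_neg hb]
    have hi1 : i = xs.length - 1 := by omega
    have hd : xs.drop (i + 1) = [] := List.drop_eq_nil_of_le (by omega)
    rw [List.set_eq_take_append_cons_drop, if_pos (by omega)]
    rw [hd]
    have : xs.drop (xs.length - 1 + 1) = [] := List.drop_eq_nil_of_le (by omega)
    rw [this, hi1]
    simp

theorem stepA_z_val_big (xs : List Int) (i : Nat) (ch : Bool) (h : xs.getD i 0 = 0)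
    (hi : xs.length ≤ i) :
    ((stepA (xs, i, ch)).1).drop i = [] := by
  apply List.drop_eq_nil_of_le
  simp only [stepA, h, if_neg (by simp : ¬ ((0:Int) ≠ 0)), shiftCol1_spec]
  by_cases hb : i < xs.length - 1
  · omega
  · rw [if_neg hb]; simp; omega

-- ch = true is absorbing for stepA
theorem stepA_true (t : Nat) : ∀ xs i, (stepA^[t] (xs, i, true)).2.2 = true := by
  induction t with
  | zero => intro xs i; rfl
  | succ t ih =>
    intro xs i
    rw [Function.iterate_succ_apply]
    by_cases h : xs.getD i 0 ≠ 0
    · rw [stepA_nz xs i true h]; exact ih xs (i + 1)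
    · push_neg at h
      have hch := stepA_z_ch xs i true h
      have : stepA (xs, i, true) = ((stepA (xs, i, true)).1, i, true) := by
        rw [Prod.ext_iff, hch]
        constructor
        · rfl
        · simp
      rw [this]
      exact ih _ i

-- no zero-above-nonzero: ch never set
theorem stepA_clean (t : Nat) : ∀ xs i ch, hasZN (xs.drop i) = false →
    (stepA^[t] (xs, i, ch)).2.2 = ch := by
  induction t with
  | zero => intro xs i ch _; rfl
  | succ t ih =>
    intro xs i ch hz
    rw [Function.iterate_succ_apply]
    by_cases h : xs.getD i 0 ≠ 0
    · rw [stepA_nz xs i ch h]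
      apply ih
      have hi : i < xs.length := by
        by_contra hcon
        rw [List.getD_eq_getElem?_getD, List.getElem?_eq_none (by omega)] at h
        simp at h
      rw [List.drop_eq_getElem_cons hi] at hz
      have hxi : xs[i] ≠ 0 := by
        rw [List.getD_eq_getElem?_getD, List.getElem?_eq_getElem hi] at h
        simpa using h
      simpa [hasZN, hxi] using hz
    · push_neg at h
      by_cases hi : i < xs.length
      · have hxi : xs[i] = 0 := by
          rw [List.getD_eq_getElem?_getD, List.getElem?_eq_getElem hi] at h
          simpa using h
        rw [List.drop_eq_getElem_cons hi, hxi] at hz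
        have hany : (xs.drop (i + 1)).any (fun v => decide (v ≠ 0)) = false := by
          simpa [hasZN] using hz
        have hst : stepA (xs, i, ch) = ((stepA (xs, i, ch)).1, i, ch) := by
          rw [Prod.ext_iff]
          refine ⟨rfl, ?_⟩
          rw [stepA_z_ch xs i ch h, hany]
          simp
        rw [hst]
        apply ih
        rw [stepA_z_val xs i ch h hi]
        apply hasZN_allzero
        intro v hv
        rw [List.append_assoc, List.drop_append] at hv
        have htl : (xs.take i).length = i := by simp; omega
        rw [List.drop_of_length_le (by omega), htl] at hv
        simp only [Nat.sub_self, List.drop_zero, List.nil_append] at hv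
        rcases List.mem_append.mp hv with hv | hv
        · have := List.any_eq_false.mp hany v hv
          simpa using this
        · simpa using hv
      · have hst : stepA (xs, i, ch) = ((stepA (xs, i, ch)).1, i, ch) := by
          rw [Prod.ext_iff]
          refine ⟨rfl, ?_⟩
          rw [stepA_z_ch xs i ch h]
          rw [List.drop_eq_nil_of_le (by omega)]
          simp
        rw [hst]
        apply ih
        rw [stepA_z_val_big xs i ch h (by omega)]
        rfl

-- zero-above-nonzero present: ch gets set within enough steps
theorem stepA_dirty (t : Nat) : ∀ xs i ch, hasZN (xs.drop i) = true →
    ((xs.drop i).takeWhile (fun v => decide (v ≠ 0))).length < t →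
    (stepA^[t] (xs, i, ch)).2.2 = true := by
  induction t with
  | zero => intro xs i ch _ ht; omega
  | succ t ih =>
    intro xs i ch hz ht
    have hne : xs.drop i ≠ [] := by
      intro hcon
      rw [hcon] at hz
      simp [hasZN] at hz
    have hi : i < xs.length := by
      by_contra hcon
      exact hne (List.drop_eq_nil_of_le (by omega))
    rw [Function.iterate_succ_apply]
    rw [List.drop_eq_getElem_cons hi] at hz ht
    by_cases h : xs.getD i 0 ≠ 0
    · rw [stepA_nz xs i ch h]
      have hxi : xs[i] ≠ 0 := by
        rw [List.getD_eq_getElem?_getD, List.getElem?_eq_getElem hi] at h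
        simpa using h
      apply ih
      · simpa [hasZN, hxi] using hz
      · rw [List.takeWhile_cons, if_pos (by simpa using hxi)] at ht
        simpa using Nat.lt_of_succ_lt_succ (by simpa using ht)
    · push_neg at h
      have hxi : xs[i] = 0 := by
        rw [List.getD_eq_getElem?_getD, List.getElem?_eq_getElem hi] at h
        simpa using h
      rw [hxi] at hz
      have hany : (xs.drop (i + 1)).any (fun v => decide (v ≠ 0)) = true := by
        simpa [hasZN] using hz
      have hst : stepA (xs, i, ch) = ((stepA (xs, i, ch)).1, i, true) := by
        rw [Prod.ext_iff]
        refine ⟨rfl, ?_⟩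
        rw [stepA_z_ch xs i ch h, hany]
        simp
      rw [hst]
      exact stepA_true t _ i

theorem final1d (xs : List Int) (ch : Bool) :
    (stepA^[xs.length] (xs, 0, ch)).2.2 = (ch || hasZN xs) := by
  cases ch with
  | true => simp [stepA_true]
  | false =>
    cases hz : hasZN xs with
    | false => simpa using stepA_clean xs.length xs 0 false (by simpa using hz)
    | true =>
      simp only [Bool.false_or]
      exact stepA_dirty xs.length xs 0 false (by simpa using hz)
        (by simpa using hasZN_takeWhile xs hz)

theorem any_congr {α : Type} (l : List α) (p q : α → Bool) (h : ∀ a ∈ l, p a = q a) :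
    l.any p = l.any q := by
  induction l with
  | nil => rfl
  | cons x xs ih =>
    simp only [List.any_cons]
    rw [h x (List.mem_cons_self), ih (fun a ha => h a (List.mem_cons_of_mem _ ha))]

-- iterating innerStep simulates iterating stepA
theorem iter_sim (k c : Nat) (hc : c < k) (t : Nat) :
    ∀ g i ch, RowsOK g k →
      ((innerStep c)^[t] (g, i, ch)).1.length = g.length ∧
      RowsOK ((innerStep c)^[t] (g, i, ch)).1 k ∧
      (∀ c', c' ≠ c → col ((innerStep c)^[t] (g, i, ch)).1 c' = col g c') ∧
      ((innerStep c)^[t] (g, i, ch)).2 = (stepA^[t] (col g c, i, ch)).2 := by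
  induction t with
  | zero => exact fun g i ch _ => ⟨rfl, by simpa, fun _ _ => rfl, rfl⟩
  | succ t ih =>
    intro g i ch hk
    obtain ⟨s1, s2, s3, s4, s5⟩ := innerStep_sim k c hc g i ch hk
    rw [Function.iterate_succ_apply, Function.iterate_succ_apply]
    have hsA : stepA (col g c, i, ch)
        = (col (innerStep c (g, i, ch)).1 c, (innerStep c (g, i, ch)).2) := by
      rw [Prod.ext_iff]
      exact ⟨s4.symm, s5.symm⟩
    rw [hsA]
    obtain ⟨i1, i2, i3, i4⟩ :=
      ih (innerStep c (g, i, ch)).1 (innerStep c (g, i, ch)).2.1 (innerStep c (g, i, ch)).2.2 s2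
    refine ⟨by rw [← s1]; exact i1, i2, ?_, i4⟩
    intro c' hc'
    rw [i3 c' hc', s3 c' hc']

theorem foldl_const {α β : Type} (f : α → α) (l : List β) (st : α) :
    l.foldl (fun s _ => f s) st = f^[l.length] st := by
  induction l generalizing st with
  | nil => rfl
  | cons x xs ih => simp [List.foldl_cons, ih, Function.iterate_succ_apply]

theorem colPass_spec (k c : Nat) (hc : c < k) (g : List (List Int)) (ch : Bool)
    (hk : RowsOK g k) :
    (colPass g c ch).1.length = g.length ∧
    RowsOK (colPass g c ch).1 k ∧
    (∀ c', c' ≠ c → col (colPass g c ch).1 c' = col g c') ∧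
    (colPass g c ch).2 = (ch || hasZN (col g c)) := by
  have hfold : (List.range g.length).foldl (fun st _ => innerStep c st) (g, 0, ch)
      = (innerStep c)^[g.length] (g, 0, ch) := by
    rw [foldl_const, List.length_range]
  obtain ⟨i1, i2, i3, i4⟩ := iter_sim k c hc g.length g 0 ch hk
  have hlc : (col g c).length = g.length := by simp [col]
  refine ⟨?_, ?_, ?_, ?_⟩
  · simpa [colPass, hfold] using i1
  · simpa [colPass, hfold] using i2
  · intro c' hc'
    simpa [colPass, hfold] using i3 c' hc'
  · show ((List.range g.length).foldl (fun st _ => innerStep c st) (g, 0, ch)).2.2 = _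
    rw [hfold]
    have h2 := congrArg Prod.snd i4
    simp only [] at h2
    rw [h2, ← hlc, final1d]

theorem outer_fold (k : Nat) : ∀ (L : List Nat) (g : List (List Int)) (ch : Bool),
    L.Nodup → (∀ c ∈ L, c < k) → RowsOK g k →
    (L.foldl (fun st c => colPass st.1 c st.2) (g, ch)).2
      = (ch || L.any (fun c => hasZN (col g c))) := by
  intro L
  induction L with
  | nil => intro g ch _ _ _; simp
  | cons c L ih =>
    intro g ch hnd hlt hk
    obtain ⟨p1, p2, p3, p4⟩ := colPass_spec k c (hlt c (List.mem_cons_self)) g ch hk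
    simp only [List.foldl_cons]
    have hpair : colPass g c ch = ((colPass g c ch).1, ch || hasZN (col g c)) := by
      rw [Prod.ext_iff]
      exact ⟨rfl, p4⟩
    rw [hpair, ih (colPass g c ch).1 (ch || hasZN (col g c)) (List.Nodup.of_cons hnd)
      (fun c' hc' => hlt c' (List.mem_cons_of_mem _ hc')) p2]
    have hcols : L.any (fun c' => hasZN (col (colPass g c ch).1 c'))
        = L.any (fun c' => hasZN (col g c')) := by
      apply any_congr
      intro c' hc'
      have : c' ≠ c := fun h => (List.nodup_cons.mp hnd).1 (h ▸ hc')
      rw [p3 c' this]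
    rw [hcols, List.any_cons, Bool.or_assoc]

-- hasZN xs ⇔ compacting changes xs
theorem hasZN_compact (xs : List Int) :
    hasZN xs = decide (compact xs.length xs ≠ xs) := by
  induction xs with
  | nil => rfl
  | cons x xs ih =>
    by_cases hx : x = 0
    · subst hx
      have hL : hasZN (0 :: xs) = xs.any (fun v => decide (v ≠ 0)) := by simp [hasZN]
      rw [hL]
      have hfc : (0 :: xs).filter (fun v => decide (v ≠ 0))
          = xs.filter (fun v => decide (v ≠ 0)) := by
        rw [List.filter_cons]
        simp
      cases hany : xs.any (fun v => decide (v ≠ 0)) with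
      | false =>
        have hall : ∀ v ∈ xs, v = 0 := by
          intro v hv
          have := List.any_eq_false.mp hany v hv
          simpa using this
        have hfil : xs.filter (fun v => decide (v ≠ 0)) = [] := by
          rw [List.filter_eq_nil_iff]
          intro v hv
          simp [hall v hv]
        have hxs : xs = List.replicate xs.length (0 : Int) :=
          List.eq_replicate_of_mem hall
        have hc : compact (xs.length + 1) (0 :: xs) = 0 :: xs := by
          unfold compact
          rw [hfc, hfil]
          simp only [List.nil_append, List.length_nil, Nat.sub_zero, List.length_cons]
          conv_rhs => rw [hxs]
          rw [← List.replicate_succ]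
        simp [hc]
      | true =>
        obtain ⟨v, hv, hvne⟩ := List.any_eq_true.mp hany
        have hvne' : v ≠ 0 := by simpa using hvne
        have hmem : v ∈ xs.filter (fun v => decide (v ≠ 0)) :=
          List.mem_filter.mpr ⟨hv, by simpa using hvne'⟩
        have hcne : compact (xs.length + 1) (0 :: xs) ≠ 0 :: xs := by
          cases hf : xs.filter (fun v => decide (v ≠ 0)) with
          | nil => rw [hf] at hmem; simp at hmem
          | cons y ys =>
            have hy : y ≠ 0 := by
              have hym : y ∈ xs.filter (fun v => decide (v ≠ 0)) := by
                rw [hf]; exact List.mem_cons_self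
              simpa using (List.mem_filter.mp hym).2
            intro heq
            unfold compact at heq
            rw [hfc, hf] at heq
            simp only [List.cons_append, List.cons.injEq] at heq
            exact hy heq.1
        simp [hcne]
    · have hstep : compact (xs.length + 1) (x :: xs) = x :: compact xs.length xs := by
        simp only [compact, List.filter_cons, decide_eq_true_eq]
        rw [if_pos (by simpa using hx)]
        simp only [List.length_cons, List.cons_append, List.cons.injEq, true_and]
        congr 1
        simp
      have hL2 : hasZN (x :: xs) = hasZN xs := by simp [hasZN, hx]
      rw [hL2, ih]
      simp only [List.length_cons, hstep]
      simp [hx]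

theorem zip_map_any {α β γ : Type} (l : List α) (f : α → β) (g : α → γ)
    (q : β × γ → Bool) :
    ((l.map f).zip (l.map g)).any q = l.any (fun x => q (f x, g x)) := by
  induction l with
  | nil => rfl
  | cons x xs ih => simp only [List.map_cons, List.zip_cons_cons, List.any_cons, ih]

theorem alt_any (grid : List (List Int)) :
    compress_up_alt grid
      = (List.range ((grid.getD 0 []).length)).any
          (fun c => decide (compact grid.length (col grid c) ≠ col grid c)) := by
  unfold compress_up_alt
  simp only [List.map_map]
  rw [show (List.range ((grid.getD 0 []).length)).map
      (compact grid.length ∘ fun c => grid.map (fun row => row.getD c 0))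
      = (List.range ((grid.getD 0 []).length)).map
        (fun c => compact grid.length (col grid c)) from rfl]
  rw [show (List.range ((grid.getD 0 []).length)).map (fun c => grid.map (fun row => row.getD c 0))
      = (List.range ((grid.getD 0 []).length)).map (fun c => col grid c) from rfl]
  exact zip_map_any _ _ _ _

-- ===== VERDICT (by name: the statement is the Claim_ definition above) =====
theorem compress_up_spec : Claim_equal_compress_up := by
  intro grid _ hpre
  unfold Spec_compress_up
  obtain ⟨hne, hrows⟩ := hpre
  have hhead : grid.getD 0 [] = grid.headD [] := by
    cases grid with
    | nil => exact absurd rfl hne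
    | cons r rs => rfl
  have hk : RowsOK grid ((grid.getD 0 []).length) := by
    intro row hrow
    rw [hhead]
    exact hrows row hrow
  rw [alt_any]
  unfold compress_up
  rw [outer_fold ((grid.getD 0 []).length) (List.range ((grid.getD 0 []).length)) grid false
    (List.nodup_range) (fun c hc => List.mem_range.mp hc) hk]
  rw [Bool.false_or]
  apply any_congr
  intro c _
  rw [hasZN_compact (col grid c)]
  have : (col grid c).length = grid.length := by simp [col]
  rw [this]
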